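-- pv_equiv track=rewrite | github.com/felmhorst/minecraft-ai-model | scripts/palette/generate_global_palette.py | get_block_configurations_from_variants
-- ===== SOURCE A (Python) =====
-- def can_be_powered(block_type):
--     return block_type.endswith(('_door', '_trapdoor'))
--
-- def can_be_waterlogged(block_type):
--     return block_type.endswith(('_bars', '_fence', '_ladder', '_pane', '_slab', '_stairs', '_trapdoor', '_wall', '_wall_sign'))
--
-- def get_runtime_variants(block_type, block):
--     runtime_variants = [block]
--
--     if can_be_powered(block_type):
--         variants_to_process = runtime_variants.copy()
--         runtime_variants = []
--         for variant in variants_to_process: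
--             base = variant[:-1] if variant.endswith(']') else variant
--             runtime_variants.append(f'{base},powered=true]')
--             runtime_variants.append(f'{base},powered=false]')
--
--     if can_be_waterlogged(block_type):
--         variants_to_process = runtime_variants.copy()
--         runtime_variants = []
--         for variant in variants_to_process:
--             base = variant[:-1] if variant.endswith(']') else variant
--             runtime_variants.append(f'{base},waterlogged=true]')
--             runtime_variants.append(f'{base},waterlogged=false]')
--
--     return runtime_variants
--
-- def get_block_configurations_from_variants(block_type, variants):
--     configurations = []
--     for config in variants.keys():
--         if config != "":
--             config = f'[{config}]'
--         block = f'minecraft:{block_type}{config}'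
--         configurations += get_runtime_variants(block_type, block)
--     return configurations
-- ===== SOURCE B (Python) =====
-- def get_block_configurations_from_variants(block_type, variants):
--     # Table-driven: dispatch once on the two flags to a fixed list of full
--     # suffix literals; each key then becomes a single map over that table.
--     p = block_type.endswith(('_door', '_trapdoor'))
--     w = block_type.endswith(('_bars', '_fence', '_ladder', '_pane', '_slab', '_stairs', '_trapdoor', '_wall', '_wall_sign'))
--     if p and w:
--         suffixes = [',powered=true,waterlogged=true]',
--                     ',powered=true,waterlogged=false]',
--                     ',powered=false,waterlogged=true]',
--                     ',powered=false,waterlogged=false]']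
--     elif p:
--         suffixes = [',powered=true]', ',powered=false]']
--     elif w:
--         suffixes = [',waterlogged=true]', ',waterlogged=false]']
--     else:
--         suffixes = None
--     configurations = []
--     for config in variants:
--         block = f'minecraft:{block_type}[{config}]' if config != "" else f'minecraft:{block_type}'
--         if suffixes is None:
--             configurations.append(block)
--         else:
--             base = block[:-1] if block.endswith(']') else block
--             configurations.extend(base + s for s in suffixes)
--     return configurations
-- ===== Notes on version B (the rewrite author's own statement) =====
-- stated objective: alternative
-- what changed: A rewrites the variant list in up to two strip-and-double passes per key; B dispatches once on the (powered, waterlogged) flag pair to a fixed four/two/zero-entry table of complete suffix literals and then maps each key's base over that table, with no per-key expansion loop at all.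
import Mathlib
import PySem

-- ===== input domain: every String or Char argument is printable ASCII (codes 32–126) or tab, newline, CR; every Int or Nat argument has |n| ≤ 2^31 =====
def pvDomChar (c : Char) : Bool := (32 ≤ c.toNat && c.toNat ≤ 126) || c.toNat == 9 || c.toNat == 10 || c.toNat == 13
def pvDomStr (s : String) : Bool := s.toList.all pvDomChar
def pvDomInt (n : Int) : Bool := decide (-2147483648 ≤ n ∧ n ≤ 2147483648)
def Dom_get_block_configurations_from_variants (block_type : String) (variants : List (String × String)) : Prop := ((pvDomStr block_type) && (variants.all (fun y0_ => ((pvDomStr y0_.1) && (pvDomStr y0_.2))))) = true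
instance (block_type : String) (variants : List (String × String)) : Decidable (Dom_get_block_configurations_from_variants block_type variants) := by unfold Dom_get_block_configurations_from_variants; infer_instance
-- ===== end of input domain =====

-- B replaces A's per-key strip-and-double rewriting passes by a one-time dispatch on the
-- (powered, waterlogged) flag pair to a fixed table of complete suffix literals, mapped over
-- each key's base (objective: alternative table-driven decomposition, same cost).

-- ===== PORT A =====
-- shared one-liner from both Pythons: `v[:-1] if v.endswith(']') else v`
def pvStripBr (v : List Char) : List Char :=
  if PySem.Chars.endswith v [']'] then PySem.List.slice v none (some (-1)) else v

def can_be_powered (bt : List Char) : Bool :=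
  PySem.Chars.endswith bt "_door".toList || PySem.Chars.endswith bt "_trapdoor".toList

def can_be_waterlogged (bt : List Char) : Bool :=
  PySem.Chars.endswith bt "_bars".toList || PySem.Chars.endswith bt "_fence".toList ||
  PySem.Chars.endswith bt "_ladder".toList || PySem.Chars.endswith bt "_pane".toList ||
  PySem.Chars.endswith bt "_slab".toList || PySem.Chars.endswith bt "_stairs".toList ||
  PySem.Chars.endswith bt "_trapdoor".toList || PySem.Chars.endswith bt "_wall".toList ||
  PySem.Chars.endswith bt "_wall_sign".toList

def get_runtime_variants (bt : List Char) (block : List Char) : List (List Char) :=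
  let rv : List (List Char) := [block]
  let rv := if can_be_powered bt then
      rv.foldl (fun acc v =>
        acc ++ [pvStripBr v ++ ",powered=true]".toList, pvStripBr v ++ ",powered=false]".toList]) []
    else rv
  let rv := if can_be_waterlogged bt then
      rv.foldl (fun acc v =>
        acc ++ [pvStripBr v ++ ",waterlogged=true]".toList, pvStripBr v ++ ",waterlogged=false]".toList]) []
    else rv
  rv

def get_block_configurations_from_variants (block_type : String) (variants : List (String × String)) : List String :=
  let bt := block_type.toList
  (variants.foldl (fun acc kv =>
      let config := kv.1.toList
      let config := if config.isEmpty then config else '[' :: config ++ [']']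
      let block := "minecraft:".toList ++ bt ++ config
      acc ++ get_runtime_variants bt block) []).map String.ofList

-- ===== PORT B =====
-- the fixed suffix table chosen once from the two flags (Source B's if/elif chain)
def pvSuffixTable (p w : Bool) : Option (List (List Char)) :=
  if p && w then
    some [",powered=true,waterlogged=true]".toList,
          ",powered=true,waterlogged=false]".toList,
          ",powered=false,waterlogged=true]".toList,
          ",powered=false,waterlogged=false]".toList]
  else if p then some [",powered=true]".toList, ",powered=false]".toList]
  else if w then some [",waterlogged=true]".toList, ",waterlogged=false]".toList]
  else none

def get_block_configurations_from_variants_alt (block_type : String) (variants : List (String × String)) : List String :=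
  let bt := block_type.toList
  let p := PySem.Chars.endswith bt "_door".toList || PySem.Chars.endswith bt "_trapdoor".toList
  let w := PySem.Chars.endswith bt "_bars".toList || PySem.Chars.endswith bt "_fence".toList ||
    PySem.Chars.endswith bt "_ladder".toList || PySem.Chars.endswith bt "_pane".toList ||
    PySem.Chars.endswith bt "_slab".toList || PySem.Chars.endswith bt "_stairs".toList ||
    PySem.Chars.endswith bt "_trapdoor".toList || PySem.Chars.endswith bt "_wall".toList ||
    PySem.Chars.endswith bt "_wall_sign".toList
  let suffixes := pvSuffixTable p w
  (variants.foldl (fun acc kv =>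
      let config := kv.1.toList
      let block := if config.isEmpty then "minecraft:".toList ++ bt
                   else "minecraft:".toList ++ bt ++ '[' :: config ++ [']']
      match suffixes with
      | none => acc ++ [block]
      | some ss =>
        let base := pvStripBr block
        acc ++ ss.map (fun s => base ++ s)) []).map String.ofList

-- ===== PRECONDITION & SPEC =====
def Spec_get_block_configurations_from_variants (block_type : String) (variants : List (String × String)) (out : List String) : Prop := out = get_block_configurations_from_variants_alt block_type variants
instance (block_type : String) (variants : List (String × String)) (out : List String) : Decidable (Spec_get_block_configurations_from_variants block_type variants out) := by unfold Spec_get_block_configurations_from_variants; infer_instance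

-- ===== CLAIM (what is proved, stated in full; the proofs are below) =====
def Claim_equal_get_block_configurations_from_variants : Prop := ∀ (block_type : String) (variants : List (String × String)), Dom_get_block_configurations_from_variants block_type variants → Spec_get_block_configurations_from_variants block_type variants (get_block_configurations_from_variants block_type variants)

-- ===== LEMMAS AND PROOFS =====
theorem pvStripBr_concat (x : List Char) : pvStripBr (x ++ [']']) = x := by
  unfold pvStripBr
  rw [if_pos, PySem.List.slice_to_neg_one, List.dropLast_concat]
  exact (PySem.Chars.endswith_iff _ _).mpr ⟨x, rfl⟩

-- per-block: A's staged expansion equals B's table lookup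
theorem pv_perblock (bt block : List Char) :
    get_runtime_variants bt block =
      match pvSuffixTable (can_be_powered bt) (can_be_waterlogged bt) with
      | none => [block]
      | some ss => ss.map (fun s => pvStripBr block ++ s) := by
  have hpt : ∀ x : List Char, pvStripBr (x ++ ",powered=true]".toList) = x ++ ",powered=true".toList := by
    intro x
    rw [show (",powered=true]".toList : List Char) = ",powered=true".toList ++ [']'] from rfl,
      ← List.append_assoc, pvStripBr_concat]
  have hpf : ∀ x : List Char, pvStripBr (x ++ ",powered=false]".toList) = x ++ ",powered=false".toList := by
    intro x
    rw [show (",powered=false]".toList : List Char) = ",powered=false".toList ++ [']'] from rfl,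
      ← List.append_assoc, pvStripBr_concat]
  unfold get_runtime_variants pvSuffixTable
  rcases hp : can_be_powered bt <;> rcases hw : can_be_waterlogged bt <;>
    simp_all [List.foldl, List.append_assoc]

-- ===== VERDICT (by name: the statement is the Claim_ definition above) =====
theorem get_block_configurations_from_variants_spec : Claim_equal_get_block_configurations_from_variants := by
  intro block_type variants _
  show _ = _
  unfold get_block_configurations_from_variants get_block_configurations_from_variants_alt
  simp only
  congr 1
  apply PySem.List.foldl_congr_mem
  intro acc kv _
  have hp : (PySem.Chars.endswith block_type.toList "_door".toList ||
      PySem.Chars.endswith block_type.toList "_trapdoor".toList) = can_be_powered block_type.toList := rfl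
  have hw' : (PySem.Chars.endswith block_type.toList "_bars".toList || PySem.Chars.endswith block_type.toList "_fence".toList ||
      PySem.Chars.endswith block_type.toList "_ladder".toList || PySem.Chars.endswith block_type.toList "_pane".toList ||
      PySem.Chars.endswith block_type.toList "_slab".toList || PySem.Chars.endswith block_type.toList "_stairs".toList ||
      PySem.Chars.endswith block_type.toList "_trapdoor".toList || PySem.Chars.endswith block_type.toList "_wall".toList ||
      PySem.Chars.endswith block_type.toList "_wall_sign".toList) = can_be_waterlogged block_type.toList := rfl
  rw [hp, hw', pv_perblock]
  by_cases hE : kv.1.toList.isEmpty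
  · have hnil : kv.1.toList = [] := List.isEmpty_iff.mp hE
    rcases h : pvSuffixTable (can_be_powered block_type.toList) (can_be_waterlogged block_type.toList) <;>
      simp [hnil]
  · rcases h : pvSuffixTable (can_be_powered block_type.toList) (can_be_waterlogged block_type.toList) <;>
      simp [hE]
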